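-- pv_equiv track=rewrite | github.com/thirupathireddy665/crossbeam | src/bustle_generated_properties.py | is_two
-- ===== SOURCE A (Python) =====
-- AllTrue = -1
--
-- Mixed = 0
--
-- AllFalse = 1
--
-- def is_two(inputs):
--     is_true_present = False
--     is_false_present = False
--     for program_input in inputs:
--         if program_input == 2:
--             is_true_present = True
--         else:
--             is_false_present = True
--
--     if is_true_present and is_false_present:
--         return Mixed
--     elif is_true_present:
--         return AllTrue
--     else:
--         return AllFalse
-- ===== SOURCE B (Python) =====
-- AllTrue = -1
-- Mixed = 0
-- AllFalse = 1
--
-- def is_two(inputs):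
--     if any(x == 2 for x in inputs):
--         return AllTrue if all(x == 2 for x in inputs) else Mixed
--     return AllFalse
-- ===== Notes on version B (the rewrite author's own statement) =====
-- stated objective: simpler
-- what changed: Replaced the single flag-accumulating loop over the whole list with short-circuiting any/all predicate scans that decide the 3-way classification directly.
import Mathlib
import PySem

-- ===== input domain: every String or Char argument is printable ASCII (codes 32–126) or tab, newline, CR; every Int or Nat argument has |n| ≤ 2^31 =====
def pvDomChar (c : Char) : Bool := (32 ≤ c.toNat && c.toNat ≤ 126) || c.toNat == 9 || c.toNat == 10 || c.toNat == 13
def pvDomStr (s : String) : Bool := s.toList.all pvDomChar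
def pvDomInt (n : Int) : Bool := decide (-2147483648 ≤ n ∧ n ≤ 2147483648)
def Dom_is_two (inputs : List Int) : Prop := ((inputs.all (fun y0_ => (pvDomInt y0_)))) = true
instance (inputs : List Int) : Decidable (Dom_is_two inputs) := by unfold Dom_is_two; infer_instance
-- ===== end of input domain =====

-- B replaces A's single two-flag accumulating loop by short-circuiting any/all scans; objective: simpler.

-- ===== PORT A =====
def is_two (inputs : List Int) : Int :=
  let s := inputs.foldl
    (fun (st : Bool × Bool) program_input =>
      if program_input = 2 then (true, st.2) else (st.1, true))
    (false, false)
  if s.1 && s.2 then 0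
  else if s.1 then -1
  else 1

-- ===== PORT B =====
def is_two_alt (inputs : List Int) : Int :=
  if inputs.any (fun x => x == 2) then
    (if inputs.all (fun x => x == 2) then -1 else 0)
  else 1

-- ===== PRECONDITION & SPEC =====
def Spec_is_two (inputs : List Int) (out : Int) : Prop := out = is_two_alt inputs
instance (inputs : List Int) (out : Int) : Decidable (Spec_is_two inputs out) := by unfold Spec_is_two; infer_instance

-- ===== CLAIM (what is proved, stated in full; the proofs are below) =====
def Claim_equal_is_two : Prop := ∀ (inputs : List Int), Dom_is_two inputs → Spec_is_two inputs (is_two inputs)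

-- ===== LEMMAS AND PROOFS =====

-- A's loop state after the whole list: first flag = some element is 2, second = some element is not 2.
lemma is_two_fold (inputs : List Int) (a b : Bool) :
    inputs.foldl
      (fun (st : Bool × Bool) program_input =>
        if program_input = 2 then (true, st.2) else (st.1, true))
      (a, b)
    = (a || inputs.any (fun x => x == 2), b || inputs.any (fun x => x != 2)) := by
  induction inputs generalizing a b with
  | nil => simp
  | cons h t ih =>
    by_cases h2 : h = 2
    · simp [h2, ih]
    · simp [h2, ih, beq_eq_false_iff_ne.mpr h2, bne_iff_ne]

-- ===== VERDICT (by name: the statement is the Claim_ definition above) =====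
theorem is_two_spec : Claim_equal_is_two := by
  intro inputs _
  unfold Spec_is_two is_two is_two_alt
  rw [is_two_fold]
  simp only [Bool.false_or]
  rcases h1 : inputs.any (fun x => x == 2) <;>
  rcases h2 : inputs.any (fun x => x != 2) <;>
    simp_all [List.any_eq_true, List.all_eq_true]
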